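-- pv_equiv track=rewrite | github.com/zuquan-song/leetcode | python/robinhood/box_drop.py | box_drop
-- ===== SOURCE A (Python) =====
-- def box_drop(matrix):
--     row, col = len(matrix), len(matrix[0])
--     box = [['.'] * row for _ in range(col)]
--     for i in range(row):
--         for j in range(col):
--             box[j][row - 1 - i] = matrix[i][j]
--
--     for i in range(col-1, -1, -1):
--         for j in range(row):
--             if box[i][j] == '#':
--                 k = i + 1
--                 while k < col and box[k][j] == '.':
--                     k += 1
--                 box[i][j] = '.'
--                 box[k-1][j] = '#'
--
--     return box
-- ===== SOURCE B (Python) =====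
-- def _settle(c):
--     out = []
--     seg_len = 0
--     boxes = 0
--     for x in c:
--         if x == '#':
--             seg_len += 1
--             boxes += 1
--         elif x == '.':
--             seg_len += 1
--         else:
--             out.extend(['.'] * (seg_len - boxes))
--             out.extend(['#'] * boxes)
--             out.append(x)
--             seg_len = 0
--             boxes = 0
--     out.extend(['.'] * (seg_len - boxes))
--     out.extend(['#'] * boxes)
--     return out
--
--
-- def box_drop(matrix):
--     row, col = len(matrix), len(matrix[0])
--     cols = [_settle(matrix[row - 1 - q][:col]) for q in range(row)]
--     return [[cols[q][p] for q in range(row)] for p in range(col)]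
-- ===== Notes on version B (the rewrite author's own statement) =====
-- stated objective: alternative
-- what changed: B replaces A's mutate-rotate-then-per-box downward rescans (a while-scan per '#') with a single counting pass per rotated column: each gravity segment's boxes are counted once and the settled column is rebuilt, then the grid is assembled by transposition.
import Mathlib
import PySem

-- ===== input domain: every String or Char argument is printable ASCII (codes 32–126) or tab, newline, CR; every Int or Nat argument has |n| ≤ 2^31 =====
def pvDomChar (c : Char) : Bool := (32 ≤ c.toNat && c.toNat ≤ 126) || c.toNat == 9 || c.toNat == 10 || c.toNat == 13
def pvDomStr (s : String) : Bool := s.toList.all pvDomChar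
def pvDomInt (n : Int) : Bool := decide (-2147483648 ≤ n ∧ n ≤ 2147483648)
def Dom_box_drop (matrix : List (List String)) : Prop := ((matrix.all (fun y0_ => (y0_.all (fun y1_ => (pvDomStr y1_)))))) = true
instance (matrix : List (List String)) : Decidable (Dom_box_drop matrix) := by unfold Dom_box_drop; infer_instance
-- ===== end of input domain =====

-- B rotates the matrix by reading whole rows as the rotated columns and settles each gravity
-- segment by counting its boxes once (one pass per column) instead of A's per-box downward
-- rescans on the mutable rotated grid; objective: alternative single-pass algorithm.

-- ===== PORT A =====
-- nested-list cell read/write: box[i][j] and box[i][j] = v (indices in range on admitted inputs)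
def pvGet2 (b : List (List String)) (i j : Nat) : String := (b.getD i []).getD j ""
def pvSet2 (b : List (List String)) (i j : Nat) (v : String) : List (List String) :=
  b.set i ((b.getD i []).set j v)

-- 'k = i + 1; while k < col and box[k][j] == ".": k += 1'
def scanA (b : List (List String)) (colN j k : Nat) : Nat :=
  if _h : k < colN then
    if pvGet2 b k j == "." then scanA b colN j (k + 1) else k
  else k
termination_by colN - k

def box_drop (matrix : List (List String)) : List (List String) :=
  let row := matrix.length
  let colN := (matrix.headD []).length
  let box0 := List.replicate colN (List.replicate row ".")
  let box1 := (List.range row).foldl (fun b i =>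
      (List.range colN).foldl (fun b j => pvSet2 b j (row - 1 - i) (pvGet2 matrix i j)) b) box0
  ((List.range colN).reverse).foldl (fun b i =>
     (List.range row).foldl (fun b j =>
        if pvGet2 b i j == "#" then
          let k := scanA b colN j (i + 1)
          pvSet2 (pvSet2 b i j ".") (k - 1) j "#"
        else b) b) box1

-- ===== PORT B =====
-- one pass over a rotated column: (settled prefix, current segment length, boxes in it)
def settleStep (st : List String × Nat × Nat) (x : String) : List String × Nat × Nat :=
  if x == "#" then (st.1, st.2.1 + 1, st.2.2 + 1)
  else if x == "." then (st.1, st.2.1 + 1, st.2.2)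
  else (st.1 ++ List.replicate (st.2.1 - st.2.2) "." ++ List.replicate st.2.2 "#" ++ [x], 0, 0)

def settleB (c : List String) : List String :=
  let st := c.foldl settleStep ([], 0, 0)
  st.1 ++ List.replicate (st.2.1 - st.2.2) "." ++ List.replicate st.2.2 "#"

def box_drop_alt (matrix : List (List String)) : List (List String) :=
  let row := matrix.length
  let colN := (matrix.headD []).length
  let cols := (List.range row).map (fun q => settleB ((matrix.getD (row - 1 - q) []).take colN))
  (List.range colN).map (fun p => (List.range row).map (fun q => (cols.getD q []).getD p ""))

-- ===== PRECONDITION & SPEC =====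
-- Pre_ excludes exactly the inputs on which A raises IndexError: the empty matrix
-- (len(matrix[0])) and matrices with some row shorter than row 0 (matrix[i][j]).
def Pre_box_drop (matrix : List (List String)) : Prop :=
  matrix ≠ [] ∧ ∀ r ∈ matrix, (matrix.headD []).length ≤ r.length
instance (matrix : List (List String)) : Decidable (Pre_box_drop matrix) := by
  unfold Pre_box_drop; infer_instance

def pvWitness_box_drop : List (List String) := [["#", ".", "*"], [".", "#", "."]]

def Spec_box_drop (matrix : List (List String)) (out : List (List String)) : Prop := out = box_drop_alt matrix
instance (matrix : List (List String)) (out : List (List String)) : Decidable (Spec_box_drop matrix out) := by unfold Spec_box_drop; infer_instance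

-- ===== CLAIM (what is proved, stated in full; the proofs are below) =====
def Claim_equal_box_drop : Prop := ∀ (matrix : List (List String)), Dom_box_drop matrix → Pre_box_drop matrix → Spec_box_drop matrix (box_drop matrix)

-- ===== LEMMAS AND PROOFS =====

-- spec-level column model: number of leading "." cells
def ldots : List String → Nat
  | [] => 0
  | x :: t => if x == "." then ldots t + 1 else 0

-- place one box below the leading dots
def insertHash : List String → List String
  | [] => ["#"]
  | x :: t => if x == "." then "." :: insertHash t else "#" :: x :: t

-- settled form of one gravity column (top to bottom)
def settle : List String → List String
  | [] => []
  | x :: s => if x == "#" then insertHash (settle s)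
              else if x == "." then "." :: settle s
              else x :: settle s

-- column-level image of A's while-scan
def scanc (n : Nat) (c : List String) (k : Nat) : Nat :=
  if _h : k < n then (if c.getD k "" == "." then scanc n c (k + 1) else k) else k
termination_by n - k

-- column-level image of one (i, j) step of A's gravity loop
def colstep (n i : Nat) (c : List String) : List String :=
  if c.getD i "" == "#" then
    (c.set i ".").set (scanc n c (i + 1) - 1) "#"
  else c

-- the box as a function of its list of gravity columns
def fromCols (r n : Nat) (cs : List (List String)) : List (List String) :=
  (List.range n).map (fun p => (List.range r).map (fun q => (cs.getD q []).getD p ""))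

def Shape (r n : Nat) (cs : List (List String)) : Prop :=
  cs.length = r ∧ ∀ c ∈ cs, c.length = n

-- ---- 1-D lemmas -------------------------------------------------------------

theorem insertHash_length (t : List String) : (insertHash t).length = t.length + 1 := by
  induction t with
  | nil => simp [insertHash]
  | cons x t ih => cases hx : x == "." <;> simp [insertHash, hx, ih]


theorem settle_length (s : List String) : (settle s).length = s.length := by
  induction s with
  | nil => simp [settle]
  | cons x s ih =>
    cases hx : x == "#" <;> cases hd : x == "." <;>
      simp [settle, hx, hd, ih, insertHash_length]


theorem ldots_le (t : List String) : ldots t ≤ t.length := by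
  induction t with
  | nil => simp [ldots]
  | cons x t ih =>
    cases hx : x == "."
    · simp [ldots, hx]
    · simp [ldots, hx]
      omega


theorem set_dot_ldots (t : List String) : ("." :: t).set (ldots t) "#" = insertHash t := by
  induction t with
  | nil => simp [ldots, insertHash]
  | cons x t ih =>
    cases hx : x == "."
    · simp [ldots, hx, insertHash]
    · have hx' : x = "." := by simpa using hx
      subst hx'
      simp [ldots, insertHash, ih]


theorem scanc_eq (n : Nat) (cl : List String) (hc : cl.length = n) (k : Nat) :
    scanc n cl k = k + ldots (cl.drop k) := by
  rw [scanc]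
  by_cases h : k < n
  · have hk : k < cl.length := by omega
    have hdrop : cl.drop k = cl[k] :: cl.drop (k + 1) := List.drop_eq_getElem_cons hk
    have hgd : cl.getD k "" = cl[k] := List.getD_eq_getElem cl "" hk
    cases hd : cl.getD k "" == "."
    · simp only [h, dif_pos, Bool.false_eq_true, if_false]
      rw [hdrop]
      simp [ldots, hgd ▸ hd]
    · simp only [h, dif_pos, if_true]
      rw [scanc_eq n cl hc (k + 1), hdrop]
      have : cl[k] = "." := by have := hgd ▸ hd; simpa using this
      simp [ldots, this]
      omega
  · simp only [h, dif_neg, not_false_iff]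
    rw [List.drop_eq_nil_of_le (by omega)]
    simp [ldots]
termination_by n - k


theorem colstep_length (n i : Nat) (c : List String) : (colstep n i c).length = c.length := by
  unfold colstep
  split <;> simp


theorem colstep_take_settle (cl : List String) (i : Nat) (hi : i < cl.length) :
    colstep cl.length i (cl.take (i + 1) ++ settle (cl.drop (i + 1))) =
      cl.take i ++ settle (cl.drop i) := by
  have htake : cl.take (i + 1) = cl.take i ++ [cl[i]] := List.take_succ_eq_append_getElem hi
  have hdrop : cl.drop i = cl[i] :: cl.drop (i + 1) := List.drop_eq_getElem_cons hi
  have hlt : (cl.take i).length = i := by simp; omega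
  set t := settle (cl.drop (i + 1)) with ht
  have hstate : cl.take (i + 1) ++ t = cl.take i ++ (cl[i] :: t) := by
    rw [htake, List.append_assoc, List.singleton_append]
  rw [hstate]
  have setw : ∀ (l2 : List String) (m : Nat) (v : String),
      (cl.take i ++ l2).set (i + m) v = cl.take i ++ l2.set m v := by
    intro l2 m v
    rw [show i + m = (cl.take i).length + m by omega]
    simp
  have hget : (cl.take i ++ (cl[i] :: t)).getD i "" = cl[i] := by
    rw [List.getD_append_right _ _ _ _ (by omega), hlt]
    simp
  unfold colstep
  rw [hget]
  cases hx : cl[i] == "#"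
  · simp only [Bool.false_eq_true, if_false]
    rw [hdrop]
    cases hd : cl[i] == "."
    · have : settle (cl[i] :: cl.drop (i + 1)) = cl[i] :: t := by
        rw [ht]; simp [settle, hx, hd]
      rw [this]
    · have hda : cl[i] = "." := by simpa using hd
      have : settle (cl[i] :: cl.drop (i + 1)) = cl[i] :: t := by
        rw [ht, hda]; simp [settle]
      rw [this]
  · simp only [if_true]
    have hlen : (cl.take i ++ (cl[i] :: t)).length = cl.length := by
      rw [List.length_append, hlt, List.length_cons, ht, settle_length, List.length_drop]
      omega
    rw [scanc_eq _ _ hlen]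
    have hdrop2 : (cl.take i ++ (cl[i] :: t)).drop (i + 1) = t := by
      have h1 : cl.take i ++ (cl[i] :: t) = (cl.take i ++ [cl[i]]) ++ t := by
        rw [List.append_assoc, List.singleton_append]
      have h2 : (cl.take i ++ [cl[i]]).length = i + 1 := by
        simp only [List.length_append, hlt, List.length_cons, List.length_nil]
      rw [h1, ← h2, List.drop_left]
    rw [hdrop2]
    have hset1 : (cl.take i ++ (cl[i] :: t)).set i "." = cl.take i ++ ("." :: t) := by
      have := setw (cl[i] :: t) 0 "."
      simpa using this
    rw [hset1, show i + 1 + ldots t - 1 = i + ldots t by omega, setw, set_dot_ldots]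
    rw [hdrop]
    have : settle (cl[i] :: cl.drop (i + 1)) = insertHash t := by
      rw [ht]; simp [settle, hx]
    rw [this]

theorem col_fold_aux (cl : List String) :
    ∀ i, i ≤ cl.length →
    ((List.range i).reverse).foldl (fun c' i' => colstep cl.length i' c')
      (cl.take i ++ settle (cl.drop i)) = settle cl := by
  intro i
  induction i with
  | zero => intro _; simp
  | succ i ih =>
    intro h
    rw [List.range_succ, List.reverse_append, List.reverse_singleton]
    simp only [List.singleton_append, List.foldl_cons]
    rw [colstep_take_settle cl i (by omega)]
    exact ih (by omega)

theorem col_fold (cl : List String) :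
    ((List.range cl.length).reverse).foldl (fun c' i => colstep cl.length i c') cl = settle cl := by
  have := col_fold_aux cl cl.length le_rfl
  simpa [settle] using this

-- ---- settleB = settle -------------------------------------------------------

theorem settle_dots (a : Nat) (s : List String) :
    settle (List.replicate a "." ++ s) = List.replicate a "." ++ settle s := by
  induction a with
  | zero => simp
  | succ a ih => simp [List.replicate_succ, settle, ih]


theorem insertHash_nondot (x : String) (t : List String) (hx : (x == ".") = false) :
    insertHash (x :: t) = "#" :: x :: t := by
  simp [insertHash, hx]


theorem settle_hash_dot (b : Nat) (r : List String) :
    settle (List.replicate b "#" ++ "." :: r) = "." :: settle (List.replicate b "#" ++ r) := by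
  induction b with
  | zero => simp [settle]
  | succ b ih => simp [List.replicate_succ, settle, insertHash, ih]


theorem settle_hash_obst (b : Nat) (x : String) (r : List String)
    (h1 : (x == ".") = false) (h2 : (x == "#") = false) :
    settle (List.replicate b "#" ++ x :: r) = List.replicate b "#" ++ x :: settle r := by
  induction b with
  | zero => simp [settle, h1, h2]
  | succ b ih =>
    rw [List.replicate_succ]
    simp only [List.cons_append]
    have e : ∀ u : List String, settle ("#" :: u) = insertHash (settle u) := fun u => by
      simp [settle]
    rw [e, ih]
    cases b with
    | zero => simp [insertHash_nondot x (settle r) h1]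
    | succ b => simp [List.replicate_succ, insertHash_nondot]


theorem settle_hash_nil (b : Nat) : settle (List.replicate b "#") = List.replicate b "#" := by
  induction b with
  | zero => simp [settle]
  | succ b ih =>
    have e : ∀ u : List String, settle ("#" :: u) = insertHash (settle u) := fun u => by
      simp [settle]
    rw [List.replicate_succ, e, ih]
    cases b with
    | zero => simp [insertHash]
    | succ b => simp [List.replicate_succ, insertHash_nondot]


theorem settleB_invariant (rest : List String) (out : List String) (L b : Nat) (hb : b ≤ L) :
    (let st := rest.foldl settleStep (out, L, b);
      st.1 ++ List.replicate (st.2.1 - st.2.2) "." ++ List.replicate st.2.2 "#") =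
      out ++ settle (List.replicate (L - b) "." ++ (List.replicate b "#" ++ rest)) := by
  induction rest generalizing out L b with
  | nil => simp [settle_dots, settle_hash_nil]
  | cons x rest ih =>
    simp only [List.foldl_cons]
    cases hh : x == "#"
    · cases hdd : x == "."
      · have hst : settleStep (out, L, b) x =
            (out ++ List.replicate (L - b) "." ++ List.replicate b "#" ++ [x], 0, 0) := by
          simp [settleStep, hh, hdd]
        rw [hst, ih _ 0 0 (le_refl 0)]
        simp only [Nat.sub_self, List.replicate_zero, List.nil_append]
        rw [settle_dots (L - b), settle_hash_obst b x rest hdd hh]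
        simp [List.append_assoc]
      · have hda : x = "." := by simpa using hdd
        subst hda
        have hst : settleStep (out, L, b) "." = (out, L + 1, b) := by
          simp [settleStep, hh]
        rw [hst, ih out (L + 1) b (by omega)]
        rw [settle_dots, settle_dots, settle_hash_dot]
        rw [show L + 1 - b = (L - b) + 1 by omega, List.replicate_succ']
        simp
    · have hha : x = "#" := by simpa using hh
      subst hha
      have hst : settleStep (out, L, b) "#" = (out, L + 1, b + 1) := by
        simp [settleStep]
      rw [hst, ih out (L + 1) (b + 1) (by omega)]
      rw [show L + 1 - (b + 1) = L - b by omega, List.replicate_succ']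
      simp


theorem settleB_eq_settle (c : List String) : settleB c = settle c := by
  have := settleB_invariant c [] 0 0 (le_refl 0)
  simpa [settleB] using this


-- ---- 2-D bookkeeping --------------------------------------------------------

theorem get2_fromCols (r n : Nat) (cs : List (List String)) (p q : Nat)
    (hp : p < n) (hq : q < r) :
    pvGet2 (fromCols r n cs) p q = (cs.getD q []).getD p "" := by
  unfold pvGet2 fromCols
  rw [PySem.List.getD_map_range _ _ _ _ hp, PySem.List.getD_map_range _ _ _ _ hq]


theorem getD_set_self (l : List String) (i : Nat) (v d : String) (h : i < l.length) :
    (l.set i v).getD i d = v := by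
  simp [List.getD_eq_getElem?_getD, h]

theorem getD_set_ne (l : List String) (i j : Nat) (v d : String) (h : ¬ i = j) :
    (l.set i v).getD j d = l.getD j d := by
  simp [List.getD_eq_getElem?_getD, h]

theorem getDL_set_self (l : List (List String)) (i : Nat) (v : List String)
    (h : i < l.length) : (l.set i v).getD i [] = v := by
  simp [List.getD_eq_getElem?_getD, h]

theorem getDL_set_ne (l : List (List String)) (i j : Nat) (v : List String) (h : ¬ i = j) :
    (l.set i v).getD j [] = l.getD j [] := by
  simp [List.getD_eq_getElem?_getD, h]

theorem set_map_range {β : Type} [Inhabited β] (n : Nat) (f : Nat → β) (p : Nat) (w : β)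
    (_hp : p < n) :
    ((List.range n).map f).set p w = (List.range n).map (fun i => if i = p then w else f i) := by
  apply List.ext_getElem
  · simp
  intro i h1 h2
  have hin : i < n := by simpa using h2
  simp only [List.getElem_set, List.getElem_map, List.getElem_range]
  split_ifs with h3 h4 h4 <;> first | rfl | omega

theorem shape_set (r n : Nat) (cs : List (List String)) (hs : Shape r n cs)
    (q : Nat) (c : List String) (hc : c.length = n) : Shape r n (cs.set q c) := by
  obtain ⟨hlen, hmem⟩ := hs
  refine ⟨by simpa using hlen, ?_⟩
  intro d hd
  rcases List.mem_or_eq_of_mem_set hd with h | h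
  · exact hmem d h
  · rw [h]; exact hc

theorem set2_fromCols (r n : Nat) (cs : List (List String)) (hs : Shape r n cs)
    (p q : Nat) (hp : p < n) (hq : q < r) (v : String) :
    pvSet2 (fromCols r n cs) p q v = fromCols r n (cs.set q ((cs.getD q []).set p v)) := by
  obtain ⟨hlen, hmem⟩ := hs
  have hqcs : q < cs.length := by omega
  have hrowlen : (cs.getD q []).length = n := by
    rw [List.getD_eq_getElem _ _ hqcs]
    exact hmem _ (List.getElem_mem hqcs)
  unfold pvSet2 fromCols
  rw [PySem.List.getD_map_range _ _ _ _ hp, set_map_range _ _ _ _ hp]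
  apply List.map_congr_left
  intro p' hmemp'
  have hp' : p' < n := List.mem_range.mp hmemp'
  by_cases hpp : p' = p
  · subst hpp
    rw [if_pos rfl, set_map_range _ _ _ _ hq]
    apply List.map_congr_left
    intro q' hmemq'
    have hq' : q' < r := List.mem_range.mp hmemq'
    by_cases hqq : q' = q
    · subst hqq
      rw [if_pos rfl, getDL_set_self cs q' _ hqcs,
          getD_set_self _ _ _ _ (by rw [hrowlen]; omega)]
    · rw [if_neg hqq, getDL_set_ne cs q q' _ (fun h => hqq h.symm)]
  · rw [if_neg hpp]
    apply List.map_congr_left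
    intro q' hmemq'
    have hq' : q' < r := List.mem_range.mp hmemq'
    by_cases hqq : q' = q
    · subst hqq
      rw [getDL_set_self cs q' _ hqcs, getD_set_ne _ _ _ _ _ (fun h => hpp h.symm)]
    · rw [getDL_set_ne cs q q' _ (fun h => hqq h.symm)]

theorem scanA_fromCols (r n : Nat) (cs : List (List String)) (hs : Shape r n cs)
    (j : Nat) (hj : j < r) (k : Nat) :
    scanA (fromCols r n cs) n j k = scanc n (cs.getD j []) k := by
  rw [scanA, scanc]
  by_cases h : k < n
  · rw [dif_pos h, dif_pos h, get2_fromCols r n cs k j h hj]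
    cases hd : (cs.getD j []).getD k "" == "."
    · simp only [Bool.false_eq_true, if_false]
    · simp only [if_true]
      exact scanA_fromCols r n cs hs j hj (k + 1)
  · rw [dif_neg h, dif_neg h]
termination_by n - k


theorem gravStep_fromCols (r n : Nat) (cs : List (List String)) (hs : Shape r n cs)
    (i j : Nat) (hi : i < n) (hj : j < r) :
    (if pvGet2 (fromCols r n cs) i j == "#" then
        pvSet2 (pvSet2 (fromCols r n cs) i j ".") (scanA (fromCols r n cs) n j (i + 1) - 1) j "#"
      else fromCols r n cs) =
      fromCols r n (cs.set j (colstep n i (cs.getD j []))) := by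
  have hlen := hs.1
  have hjcs : j < cs.length := by omega
  have hrowlen : (cs.getD j []).length = n := by
    rw [List.getD_eq_getElem _ _ hjcs]
    exact hs.2 _ (List.getElem_mem hjcs)
  rw [get2_fromCols r n cs i j hi hj]
  cases hx : (cs.getD j []).getD i "" == "#"
  · simp only [hx, Bool.false_eq_true, if_false, colstep]
    have : cs.set j (cs.getD j []) = cs := by
      rw [List.getD_eq_getElem _ _ hjcs]
      exact List.set_getElem_self hjcs
    rw [this]
  · simp only [if_true]
    rw [scanA_fromCols r n cs hs j hj]
    have hkk := scanc_eq n (cs.getD j []) hrowlen (i + 1)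
    have hkub : scanc n (cs.getD j []) (i + 1) ≤ n := by
      have h1 := ldots_le ((cs.getD j []).drop (i + 1))
      have h2 : ((cs.getD j []).drop (i + 1)).length = n - (i + 1) := by
        rw [List.length_drop, hrowlen]
      omega
    have hk1 : scanc n (cs.getD j []) (i + 1) - 1 < n := by omega
    rw [set2_fromCols r n cs hs i j hi hj "."]
    have hs2 : Shape r n (cs.set j ((cs.getD j []).set i ".")) := by
      refine shape_set r n cs hs j _ ?_
      rw [List.length_set, hrowlen]
    rw [set2_fromCols r n _ hs2 _ j hk1 hj "#"]
    rw [getDL_set_self cs j _ hjcs, List.set_set]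
    have : colstep n i (cs.getD j []) =
        ((cs.getD j []).set i ".").set (scanc n (cs.getD j []) (i + 1) - 1) "#" := by
      simp only [colstep, hx, if_true]
    rw [this]


-- generic: setting every position of a list in order, each from the OLD element there, is map
theorem foldl_setf_range' (f : List String → List String) (s m : Nat) :
    ∀ (l : List (List String)), s + m = l.length →
    (List.range' s m).foldl (fun acc j => acc.set j (f (acc.getD j []))) l =
      l.take s ++ (l.drop s).map f := by
  induction m generalizing s with
  | zero =>
    intro l hlen
    have : s = l.length := by omega
    subst this
    simp
  | succ m ih =>
    intro l hlen
    have hsl : s < l.length := by omega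
    rw [List.range'_succ, List.foldl_cons, List.getD_eq_getElem _ _ hsl]
    set acc1 := l.set s (f l[s]) with hacc
    rw [ih (s + 1) acc1 (by simp [hacc]; omega)]
    have h1 : acc1.take (s + 1) = l.take s ++ [f l[s]] := by
      apply List.ext_getElem
      · simp [hacc]
        omega
      intro u h3 h4
      have hu : u < s + 1 := by
        have := h3
        simp [hacc] at this
        omega
      have hul : u < l.length := by omega
      rw [List.getElem_take, List.getElem_set]
      by_cases hus : u < s
      · rw [if_neg (by omega), List.getElem_append_left (by simp [List.length_take]; omega)]
        rw [List.getElem_take]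
      · have : u = s := by omega
        subst this
        rw [if_pos rfl, List.getElem_append_right (by simp [List.length_take])]
        simp [List.length_take]
    have h2 : acc1.drop (s + 1) = l.drop (s + 1) := by
      rw [hacc, List.drop_set]
      simp
    rw [h1, h2, List.drop_eq_getElem_cons hsl, List.map_cons, List.append_assoc,
      List.singleton_append]


theorem foldl_setf_range (f : List String → List String) (l : List (List String)) :
    (List.range l.length).foldl (fun acc j => acc.set j (f (acc.getD j []))) l = l.map f := by
  have := foldl_setf_range' f 0 l.length l (by omega)
  simpa [List.range_eq_range'] using this


theorem grav_inner (r n : Nat) (cs : List (List String)) (hs : Shape r n cs) (i : Nat)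
    (hi : i < n) :
    (List.range r).foldl (fun b j =>
        if pvGet2 b i j == "#" then
          pvSet2 (pvSet2 b i j ".") (scanA b n j (i + 1) - 1) j "#"
        else b) (fromCols r n cs) =
      fromCols r n (cs.map (colstep n i)) := by
  have aux : ∀ (js : List Nat), (∀ j ∈ js, j < r) → ∀ (cs : List (List String)), Shape r n cs →
      js.foldl (fun b j =>
        if pvGet2 b i j == "#" then
          pvSet2 (pvSet2 b i j ".") (scanA b n j (i + 1) - 1) j "#"
        else b) (fromCols r n cs) =
      fromCols r n (js.foldl (fun cs j => cs.set j (colstep n i (cs.getD j []))) cs) := by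
    intro js
    induction js with
    | nil => intro _ cs _; simp
    | cons j js ihj =>
      intro hmemj cs hcs
      have hj : j < r := hmemj j (by simp)
      simp only [List.foldl_cons]
      rw [gravStep_fromCols r n cs hcs i j hi hj]
      refine ihj (fun x hx => hmemj x (by simp [hx])) _ ?_
      refine shape_set r n cs hcs j _ ?_
      rw [colstep_length]
      rw [List.getD_eq_getElem _ _ (by rw [hcs.1]; omega)]
      exact hcs.2 _ (List.getElem_mem (by rw [hcs.1]; omega))
  rw [aux (List.range r) (fun j hj => List.mem_range.mp hj) cs hs]
  have hcl : cs.length = r := hs.1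
  rw [← hcl, foldl_setf_range (colstep n i) cs]


theorem grav_outer (r n : Nat) (is : List Nat) (his : ∀ i ∈ is, i < n) :
    ∀ (cs : List (List String)), Shape r n cs →
    is.foldl (fun b i =>
        (List.range r).foldl (fun b j =>
          if pvGet2 b i j == "#" then
            pvSet2 (pvSet2 b i j ".") (scanA b n j (i + 1) - 1) j "#"
          else b) b) (fromCols r n cs) =
      fromCols r n (cs.map (fun c => is.foldl (fun c i => colstep n i c) c)) := by
  induction is with
  | nil => intro cs _; simp
  | cons i is ih =>
    intro cs hcs
    have hi : i < n := his i (by simp)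
    simp only [List.foldl_cons]
    rw [grav_inner r n cs hcs i hi]
    rw [ih (fun x hx => his x (by simp [hx])) _ ?_]
    · rw [List.map_map]
      rfl
    · constructor
      · simp [hcs.1]
      · intro d hd
        obtain ⟨e, he, rfl⟩ := List.mem_map.mp hd
        rw [colstep_length]
        exact hcs.2 _ he


-- ---- fill phase -------------------------------------------------------------

theorem foldl_set_range' (g : Nat → String) (s m : Nat) :
    ∀ (c : List String), s + m = c.length →
    (List.range' s m).foldl (fun c j => c.set j (g j)) c =
      c.take s ++ (List.range' s m).map g := by
  induction m generalizing s with
  | zero =>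
    intro c hlen
    have : s = c.length := by omega
    subst this
    simp
  | succ m ih =>
    intro c hlen
    have hsl : s < c.length := by omega
    rw [List.range'_succ, List.foldl_cons]
    set acc1 := c.set s (g s) with hacc
    rw [ih (s + 1) acc1 (by simp [hacc]; omega)]
    have h1 : acc1.take (s + 1) = c.take s ++ [g s] := by
      apply List.ext_getElem
      · simp [hacc]
        omega
      intro u h3 h4
      have hu : u < s + 1 := by
        have := h3
        simp [hacc] at this
        omega
      have hul : u < c.length := by omega
      rw [List.getElem_take, List.getElem_set]
      by_cases hus : u < s
      · rw [if_neg (by omega), List.getElem_append_left (by simp [List.length_take]; omega)]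
        rw [List.getElem_take]
      · have : u = s := by omega
        subst this
        rw [if_pos rfl, List.getElem_append_right (by simp [List.length_take])]
        simp [List.length_take]
    rw [h1, List.map_cons, List.append_assoc, List.singleton_append]


theorem fill_inner (r n : Nat) (cs : List (List String)) (hs : Shape r n cs)
    (q : Nat) (hq : q < r) (g : Nat → String) :
    (List.range n).foldl (fun b j => pvSet2 b j q (g j)) (fromCols r n cs) =
      fromCols r n (cs.set q ((List.range n).map g)) := by
  have hqcs : q < cs.length := by rw [hs.1]; omega
  have hrowlen : (cs.getD q []).length = n := by
    rw [List.getD_eq_getElem _ _ hqcs]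
    exact hs.2 _ (List.getElem_mem hqcs)
  have aux : ∀ (js : List Nat), (∀ j ∈ js, j < n) →
      ∀ (cs : List (List String)), Shape r n cs →
      js.foldl (fun b j => pvSet2 b j q (g j)) (fromCols r n cs) =
        fromCols r n (cs.set q (js.foldl (fun c j => c.set j (g j)) (cs.getD q []))) := by
    intro js
    induction js with
    | nil =>
      intro _ cs hcs
      have hq' : q < cs.length := by rw [hcs.1]; omega
      simp only [List.foldl_nil]
      rw [List.getD_eq_getElem _ _ hq', List.set_getElem_self hq']
    | cons j js ihj =>
      intro hmemj cs hcs
      have hj : j < n := hmemj j (by simp)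
      have hq' : q < cs.length := by rw [hcs.1]; omega
      have hrl : (cs.getD q []).length = n := by
        rw [List.getD_eq_getElem _ _ hq']
        exact hcs.2 _ (List.getElem_mem hq')
      simp only [List.foldl_cons]
      rw [set2_fromCols r n cs hcs j q hj hq (g j)]
      rw [ihj (fun x hx => hmemj x (by simp [hx])) _
        (shape_set r n cs hcs q _ (by rw [List.length_set, hrl]))]
      rw [getDL_set_self cs q _ hq', List.set_set]
  rw [aux (List.range n) (fun j hj => List.mem_range.mp hj) cs hs]
  rw [List.range_eq_range', foldl_set_range' g 0 n (cs.getD q []) (by omega)]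
  simp


theorem box0_eq (r n : Nat) :
    List.replicate n (List.replicate r ".") =
      fromCols r n (List.replicate r (List.replicate n ".")) := by
  have h1 : ∀ p, p ∈ List.range n →
      (List.range r).map (fun q =>
        ((List.replicate r (List.replicate n ".")).getD q []).getD p "") =
      List.replicate r "." := by
    intro p hp
    have hp' : p < n := List.mem_range.mp hp
    have : ∀ q, q ∈ List.range r →
        ((List.replicate r (List.replicate n ".")).getD q []).getD p "" = "." := by
      intro q hq
      rw [List.getD_replicate _ (List.mem_range.mp hq), List.getD_replicate _ hp']
    rw [List.map_congr_left this, List.map_const', List.length_range]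
  unfold fromCols
  rw [List.map_congr_left h1, List.map_const', List.length_range]


theorem fill_outer (matrix : List (List String)) (r n : Nat) (hr : r = matrix.length)
    (m : Nat) (hm : m ≤ r) :
    (List.range m).foldl (fun b i =>
        (List.range n).foldl (fun b j => pvSet2 b j (r - 1 - i) (pvGet2 matrix i j)) b)
      (fromCols r n (List.replicate r (List.replicate n "."))) =
      fromCols r n ((List.range r).map (fun q =>
        if r - m ≤ q then (List.range n).map (fun j => pvGet2 matrix (r - 1 - q) j)
        else List.replicate n ".")) := by
  induction m with
  | zero =>
    simp only [List.range_zero, List.foldl_nil]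
    have h0 : (List.range r).map (fun q =>
        if r - 0 ≤ q then (List.range n).map (fun j => pvGet2 matrix (r - 1 - q) j)
        else List.replicate n ".") = List.replicate r (List.replicate n ".") := by
      have he : ∀ q ∈ List.range r,
          (if r - 0 ≤ q then (List.range n).map (fun j => pvGet2 matrix (r - 1 - q) j)
            else List.replicate n ".") = List.replicate n "." := by
        intro q hq
        rw [if_neg (by have := List.mem_range.mp hq; omega)]
      rw [List.map_congr_left he, List.map_const', List.length_range]
    rw [h0]
  | succ m ihm =>
    have hmr : m ≤ r := by omega
    rw [List.range_succ, List.foldl_append, List.foldl_cons, List.foldl_nil, ihm hmr]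
    have hshape : Shape r n ((List.range r).map (fun q =>
        if r - m ≤ q then (List.range n).map (fun j => pvGet2 matrix (r - 1 - q) j)
        else List.replicate n ".")) := by
      constructor
      · simp
      · intro d hd
        obtain ⟨q, hqmem, hdq⟩ := List.mem_map.mp hd
        rw [← hdq]
        split_ifs <;> simp
    rw [fill_inner r n _ hshape (r - 1 - m) (by omega) (fun j => pvGet2 matrix m j)]
    congr 1
    rw [set_map_range _ _ _ _ (by omega : r - 1 - m < r)]
    apply List.map_congr_left
    intro q hq
    have hq' : q < r := List.mem_range.mp hq
    by_cases he : q = r - 1 - m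
    · rw [if_pos he, if_pos (by omega)]
      rw [he, show r - 1 - (r - 1 - m) = m by omega]
    · rw [if_neg he]
      by_cases h1 : r - m ≤ q
      · rw [if_pos h1, if_pos (by omega)]
      · rw [if_neg h1, if_neg (by omega)]


theorem take_eq_map_getD (l : List String) (n : Nat) (h : n ≤ l.length) :
    l.take n = (List.range n).map (fun j => l.getD j "") := by
  apply List.ext_getElem
  · simp [List.length_take]
    omega
  intro u h1 h2
  have hu : u < n := by simpa using h2
  rw [List.getElem_take]
  simp only [List.getElem_map, List.getElem_range]
  rw [List.getD_eq_getElem _ _ (by omega)]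


-- ===== VERDICT (by name: the statement is the Claim_ definition above) =====
theorem box_drop_spec : Claim_equal_box_drop := by
  intro matrix _hdom hpre
  obtain ⟨hne, hrows⟩ := hpre
  show box_drop matrix = box_drop_alt matrix
  set r := matrix.length with hr
  set n := (matrix.headD []).length with hn
  set cs0 := (List.range r).map (fun q =>
    (List.range n).map (fun j => pvGet2 matrix (r - 1 - q) j)) with hcs0
  have hfill : (List.range r).foldl (fun b i =>
      (List.range n).foldl (fun b j => pvSet2 b j (r - 1 - i) (pvGet2 matrix i j)) b)
      (List.replicate n (List.replicate r ".")) = fromCols r n cs0 := by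
    rw [box0_eq r n, fill_outer matrix r n hr r le_rfl]
    congr 1
    rw [hcs0]
    apply List.map_congr_left
    intro q hq
    rw [if_pos (by omega)]
  have hshape : Shape r n cs0 := by
    constructor
    · simp [hcs0]
    · intro d hd
      obtain ⟨q, hqmem, hdq⟩ := List.mem_map.mp hd
      rw [← hdq]
      simp
  have hgrav := grav_outer r n ((List.range n).reverse)
    (by intro i hi; exact List.mem_range.mp (List.mem_reverse.mp hi)) cs0 hshape
  have hcol : cs0.map (fun c => ((List.range n).reverse).foldl (fun c i => colstep n i c) c) =
      cs0.map settle := by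
    apply List.map_congr_left
    intro d hd
    have hdlen : d.length = n := by
      obtain ⟨q, hqmem, hdq⟩ := List.mem_map.mp hd
      rw [← hdq]
      simp
    have := col_fold d
    rw [hdlen] at this
    exact this
  have hcols : (List.range r).map (fun q => settleB ((matrix.getD (r - 1 - q) []).take n)) =
      cs0.map settle := by
    rw [hcs0, List.map_map]
    apply List.map_congr_left
    intro q hq
    have hq' : q < r := List.mem_range.mp hq
    have hrowmem : matrix.getD (r - 1 - q) [] ∈ matrix := by
      rw [List.getD_eq_getElem _ _ (by omega)]
      exact List.getElem_mem (by omega)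
    have hlenrow : n ≤ (matrix.getD (r - 1 - q) []).length := hrows _ hrowmem
    simp only [Function.comp]
    rw [settleB_eq_settle, take_eq_map_getD _ n hlenrow]
    rfl
  calc box_drop matrix = fromCols r n (cs0.map settle) := by
        simp only [box_drop]
        rw [hfill, hgrav, hcol]
      _ = box_drop_alt matrix := by
        simp only [box_drop_alt]
        rw [hcols, ← hr, ← hn]
        rfl
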